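-- pv_equiv track=rewrite | github.com/yfedas21/Binary | EX03_03/Python/BinaryRepPart2.py | decrement
-- ===== SOURCE A (Python) =====
-- def check(num):
--     while (num != 0):
--         if ((num & 3) == 3):
--             return True
--         else:
--             num = num >> 1
--     # Default case when num = 0 and no consecutive bits are found
--     return False
--
-- def decrement(num):
--     # less than the number entered
--     num -= 1
--     count = 0
--     while (num != 0):
--         if (check(num)):
--             count += 1
--         num -= 1
--     return count
-- ===== SOURCE B (Python) =====
-- def decrement(num):
--     # O(log num) divide-by-two recursion: g(n) = (# x<n with two adjacent set bits,
--     # # odd x<n without adjacent set bits, whether n itself has adjacent set bits)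
--     def g(n):
--         if n <= 0:
--             return (0, 0, False)
--         m, b = n >> 1, n & 1
--         h, k, a = g(m)
--         return (2 * h + k + (1 if b and a else 0),
--                 m - h - k,
--                 a or (b == 1 and m & 1 == 1))
--     return g(num)[0]
-- ===== Notes on version B (the rewrite author's own statement) =====
-- stated objective: faster
-- what changed: A tests every integer below num for an adjacent-bit pair (a bit scan per number); B computes the count with a single divide-by-two recursion on num that maintains (count with adjacent bits, count of odd numbers without, whether n itself has them).
-- outside the precondition, e.g. on decrement(0): A does not finish within the time limit, B returns 0
import Mathlib
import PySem

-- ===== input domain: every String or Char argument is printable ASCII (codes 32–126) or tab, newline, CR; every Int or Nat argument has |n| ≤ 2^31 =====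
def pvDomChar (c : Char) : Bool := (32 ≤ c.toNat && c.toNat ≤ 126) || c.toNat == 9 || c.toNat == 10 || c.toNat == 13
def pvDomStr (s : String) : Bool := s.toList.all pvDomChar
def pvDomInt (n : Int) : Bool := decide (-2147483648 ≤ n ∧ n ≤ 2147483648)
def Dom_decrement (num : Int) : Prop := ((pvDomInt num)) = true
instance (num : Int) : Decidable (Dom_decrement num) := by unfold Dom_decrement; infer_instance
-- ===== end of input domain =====

-- B replaces A's per-number scan (O(num·log num)) by a single divide-by-two recursion (O(log num)).

-- ===== PORT A =====
-- while (num != 0): if num & 3 == 3 return True else num >>= 1; return False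
-- (terminates for every Int: negatives reach -1, where (-1) & 3 == 3)
def check (num : Int) : Bool :=
  if num = 0 then false
  else if PySem.Int.band num 3 = 3 then true
  else check (num >>> (1 : Nat))
termination_by num.natAbs
decreasing_by
  rename_i h0 h3
  cases num with
  | ofNat n =>
    have hne : n ≠ 0 := by simpa using h0
    show (Int.ofNat (n >>> 1)).natAbs < (Int.ofNat n).natAbs
    show n >>> 1 < n
    have : n >>> 1 = n / 2 := by simp [Nat.shiftRight_eq_div_pow]
    omega
  | negSucc m =>
    have hm : m ≠ 0 := by
      intro h; subst h; exact h3 (by decide)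
    show (Int.negSucc (m >>> 1)).natAbs < (Int.negSucc m).natAbs
    show (m >>> 1) + 1 < m + 1
    have : m >>> 1 = m / 2 := by simp [Nat.shiftRight_eq_div_pow]
    omega

-- num -= 1; count = 0; while (num != 0): if check(num): count += 1; num -= 1
-- totality guard 'num < 0 → count': Python loops forever for negative num (outside Pre_)
def decLoop (num count : Int) : Int :=
  if num = 0 then count
  else if num < 0 then count
  else decLoop (num - 1) (count + if check num then 1 else 0)
termination_by num.toNat
decreasing_by omega

def decrement (num : Int) : Int :=
  decLoop (num - 1) 0

-- ===== PORT B =====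
-- g(n) = (# x<n with two adjacent set bits, # odd x<n without adjacent set bits,
--         whether n itself has two adjacent set bits); guard n ≤ 0 as in Source B
def gAlt (n : Int) : Int × Int × Bool :=
  if n ≤ 0 then (0, 0, false)
  else
    let m := n >>> (1 : Nat)
    let b := PySem.Int.band n 1
    let r := gAlt m
    (2 * r.1 + r.2.1 + (if b ≠ 0 ∧ r.2.2 then 1 else 0),
     m - r.1 - r.2.1,
     r.2.2 || (decide (b = 1) && decide (PySem.Int.band m 1 = 1)))
termination_by n.toNat
decreasing_by
  rename_i h
  cases n with
  | ofNat nn =>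
    have hne : nn ≠ 0 := by
      intro hh; subst hh; exact h (by decide)
    show (Int.ofNat (nn >>> 1)).toNat < (Int.ofNat nn).toNat
    show nn >>> 1 < nn
    have : nn >>> 1 = nn / 2 := by simp [Nat.shiftRight_eq_div_pow]
    omega
  | negSucc mm => exact absurd (Int.le_of_lt (Int.negSucc_lt_zero mm)) h

def decrement_alt (num : Int) : Int :=
  (gAlt num).1

-- ===== PRECONDITION & SPEC =====
-- Pre_ excludes num ≤ 0, on which A's while-loop never terminates (Python hangs).
def Pre_decrement (num : Int) : Prop := 1 ≤ num
instance (num : Int) : Decidable (Pre_decrement num) := by unfold Pre_decrement; infer_instance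
def pvWitness_decrement : Int := 5

def Spec_decrement (num : Int) (out : Int) : Prop := out = decrement_alt num
instance (num : Int) (out : Int) : Decidable (Spec_decrement num out) := by unfold Spec_decrement; infer_instance

-- ===== CLAIM (what is proved, stated in full; the proofs are below) =====
def Claim_equal_decrement : Prop := ∀ (num : Int), Dom_decrement num → Pre_decrement num → Spec_decrement num (decrement num)

-- ===== LEMMAS AND PROOFS =====

-- 'x has two adjacent set bits', as A's check computes it, on Nat
def pN (n : Nat) : Bool :=
  if n = 0 then false else ((n % 4 == 3) || pN (n / 2))
termination_by n
decreasing_by exact Nat.div_lt_self (Nat.pos_of_ne_zero (by assumption)) one_lt_two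

def hN (n : Nat) : Nat := ((List.range n).filter (fun x => pN x)).length
def kN (n : Nat) : Nat := ((List.range n).filter (fun x => x % 2 == 1 && !pN x)).length

theorem hN_succ (n : Nat) : hN (n + 1) = hN n + (if pN n then 1 else 0) := by
  by_cases hp : pN n <;> simp [hN, List.range_succ, List.filter_append, hp]

theorem kN_succ (n : Nat) :
    kN (n + 1) = kN n + (if n % 2 = 1 ∧ ¬ pN n then 1 else 0) := by
  simp [kN, List.range_succ, List.filter_append]
  by_cases h : n % 2 = 1 <;> by_cases hp : pN n <;> simp [h, hp]

theorem pN_even (m : Nat) : pN (2 * m) = pN m := by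
  rcases Nat.eq_zero_or_pos m with h | h
  · subst h; rfl
  · have h4 : (2 * m) % 4 ≠ 3 := by omega
    have h2 : 2 * m / 2 = m := by omega
    rw [pN, if_neg (by omega : ¬ (2 * m = 0)), h2]
    simp [h4]

theorem pN_odd (m : Nat) : pN (2 * m + 1) = ((m % 2 == 1) || pN m) := by
  rw [pN]
  have h2 : (2 * m + 1) / 2 = m := by omega
  have h4 : (2 * m + 1) % 4 = 2 * (m % 2) + 1 := by omega
  rcases Nat.mod_two_eq_zero_or_one m with h | h <;>
    simp [h2, h4, h]

theorem hkN_even (m : Nat) :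
    hN (2 * m) = 2 * hN m + kN m ∧ kN (2 * m) + hN m + kN m = m := by
  induction m with
  | zero => constructor <;> rfl
  | succ m ih =>
    have e2 : 2 * (m + 1) = (2 * m + 1) + 1 := by ring
    rw [e2, hN_succ, kN_succ, hN_succ, kN_succ, hN_succ, kN_succ,
        pN_even, pN_odd]
    rcases Nat.mod_two_eq_zero_or_one m with h | h <;>
      by_cases hp : pN m <;>
        simp [h, hp, (by omega : 2 * m % 2 = 0), (by omega : (2 * m + 1) % 2 = 1)] <;>
          omega

theorem checkP (n : Nat) : check (n : Int) = pN n := by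
  induction n using Nat.strong_induction_on with
  | _ n ih =>
    rcases Nat.eq_zero_or_pos n with h | h
    · subst h; rw [check, pN]; simp
    · rw [check, pN]
      have hb : PySem.Int.band (n : Int) 3 = ((n &&& 3 : Nat) : Int) := by
        exact_mod_cast PySem.Int.band_natCast n 3
      have hm : n &&& 3 = n % 4 := by
        have := Nat.and_two_pow_sub_one_eq_mod n 2
        simpa using this
      have hs : (n : Int) >>> (1 : Nat) = ((n / 2 : Nat) : Int) := by
        rw [← Int.natCast_shiftRight]
        congr 1
      by_cases h3 : n % 4 = 3
      · simp [hb, hm, h3, (by omega : (n : Int) ≠ 0)]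
      · have : ((n % 4 : Nat) : Int) ≠ 3 := by exact_mod_cast (by omega : ¬ (n % 4 = 3))
        rw [if_neg (by exact_mod_cast (by omega : (n : Int) ≠ 0)), if_neg (by rw [hb, hm]; exact this), hs,
            ih (n / 2) (by omega)]
        rw [pN, if_neg (by omega : ¬ n = 0)]
        simp [h3]

theorem gAlt_eq (n : Nat) :
    gAlt (n : Int) = ((hN n : Int), (kN n : Int), pN n) := by
  induction n using Nat.strong_induction_on with
  | _ n ih =>
    rcases Nat.eq_zero_or_pos n with h | h
    · subst h; rw [gAlt, pN]; simp [hN, kN]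
    · obtain ⟨m, b, hb', rfl⟩ : ∃ m b, b < 2 ∧ n = 2 * m + b :=
        ⟨n / 2, n % 2, by omega, by omega⟩
      rw [gAlt, if_neg (by push_cast; omega : ¬ ((2 * m + b : Nat) : Int) ≤ 0)]
      have hs : ((2 * m + b : Nat) : Int) >>> (1 : Nat) = ((m : Nat) : Int) := by
        rw [← Int.natCast_shiftRight]
        congr 1
        simp [Nat.shiftRight_eq_div_pow]
        omega
      have hb1 : PySem.Int.band ((2 * m + b : Nat) : Int) 1 = ((b : Nat) : Int) := by
        have := PySem.Int.band_natCast (2 * m + b) 1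
        rw [Nat.and_one_is_mod] at this
        rw [show ((2 * m + b) % 2) = b by omega] at this
        exact_mod_cast this
      have hbm : PySem.Int.band ((m : Nat) : Int) 1 = ((m % 2 : Nat) : Int) := by
        have := PySem.Int.band_natCast m 1
        rw [Nat.and_one_is_mod] at this
        exact_mod_cast this
      have ihh := ih m (by omega)
      have hk := hkN_even m
      simp only [hs, hb1, hbm, ihh, Prod.mk.injEq]
      interval_cases b
      · -- even: n = 2 * m
        refine ⟨?_, ?_, ?_⟩
        · rw [if_neg (by simp)]
          have := hk.1
          push_cast [show 2 * m + 0 = 2 * m from rfl, this]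
          ring
        · have := hk.2
          rw [show 2 * m + 0 = 2 * m from rfl]
          omega
        · rw [show 2 * m + 0 = 2 * m from rfl, pN_even]
          simp
      · -- odd: n = 2 * m + 1
        have hpe : pN (2 * m) = pN m := pN_even m
        have hh1 : hN (2 * m + 1) = hN (2 * m) + (if pN m then 1 else 0) := by
          rw [hN_succ, hpe]
        have hk1 : kN (2 * m + 1) = kN (2 * m) := by
          rw [kN_succ, if_neg (by omega)]; rfl
        refine ⟨?_, ?_, ?_⟩
        · rw [hh1]
          by_cases hp : pN m <;> simp [hp] <;> push_cast <;> omega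
        · rw [hk1]; omega
        · rw [pN_odd]
          rcases Nat.mod_two_eq_zero_or_one m with h2 | h2 <;> simp [h2]

def aN : Nat → Nat
  | 0 => 0
  | n + 1 => aN n + (if pN (n + 1) then 1 else 0)

theorem aN_eq (n : Nat) : aN n = hN (n + 1) := by
  induction n with
  | zero =>
    have hp0 : pN 0 = false := by rw [pN]; simp
    rw [hN_succ, hp0]; simp [aN, hN]
  | succ n ih => rw [aN, ih, hN_succ (n + 1)]

theorem decLoop_eq (n : Nat) (c : Int) : decLoop (n : Int) c = c + (aN n : Int) := by
  induction n generalizing c with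
  | zero => rw [decLoop]; simp [aN]
  | succ n ih =>
    rw [decLoop]
    push_cast
    rw [if_neg (by omega : ¬ ((n : Int) + 1) = 0),
        if_neg (by omega : ¬ ((n : Int) + 1) < 0), add_sub_cancel_right, ih]
    have hc : check ((n : Int) + 1) = pN (n + 1) := by
      have := checkP (n + 1); push_cast at this ⊢; exact this
    rw [hc, aN]
    by_cases hp : pN (n + 1) <;> simp [hp] <;> push_cast <;> ring

-- ===== VERDICT (by name: the statement is the Claim_ definition above) =====
theorem decrement_spec : Claim_equal_decrement := by
  intro num _ hpre
  have hp : 1 ≤ num := hpre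
  unfold Spec_decrement decrement decrement_alt
  obtain ⟨n, hn1, rfl⟩ : ∃ n : Nat, 1 ≤ n ∧ num = (n : Int) :=
    ⟨num.toNat, by omega, by omega⟩
  have h1 : ((n : Nat) : Int) - 1 = ((n - 1 : Nat) : Int) := by omega
  rw [h1, decLoop_eq, aN_eq, gAlt_eq]
  simp [Nat.sub_add_cancel hn1]
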